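-- pv_equiv track=rewrite | github.com/DmitriyKhudiakov/MSE_approximation | ext.py | get_ext_list
-- ===== SOURCE A (Python) =====
-- def get_ext_list(init_ext_list):
--     ext_list = []
--     for n in range(len(init_ext_list)):
--         if n == len(init_ext_list) - 1:
--             ext_list.append(init_ext_list[n])
--         else:
--             ext_list.append(init_ext_list[n] - init_ext_list[n + 1])
--     return ext_list
-- ===== SOURCE B (Python) =====
-- def get_ext_list(init_ext_list):
--     out = []
--     prev = None
--     for x in reversed(init_ext_list):
--         if prev is None:
--             out.append(x)
--         else:
--             out.append(x - prev)
--         prev = x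
--     out.reverse()
--     return out
-- ===== Notes on version B (the rewrite author's own statement) =====
-- stated objective: alternative
-- what changed: Instead of an indexed forward loop with a per-iteration last-index branch, B traverses the list in reverse carrying the previously seen element as an accumulator, builds the output back-to-front, and reverses it at the end; no index arithmetic, len() calls or subscripting per iteration.
import Mathlib
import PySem

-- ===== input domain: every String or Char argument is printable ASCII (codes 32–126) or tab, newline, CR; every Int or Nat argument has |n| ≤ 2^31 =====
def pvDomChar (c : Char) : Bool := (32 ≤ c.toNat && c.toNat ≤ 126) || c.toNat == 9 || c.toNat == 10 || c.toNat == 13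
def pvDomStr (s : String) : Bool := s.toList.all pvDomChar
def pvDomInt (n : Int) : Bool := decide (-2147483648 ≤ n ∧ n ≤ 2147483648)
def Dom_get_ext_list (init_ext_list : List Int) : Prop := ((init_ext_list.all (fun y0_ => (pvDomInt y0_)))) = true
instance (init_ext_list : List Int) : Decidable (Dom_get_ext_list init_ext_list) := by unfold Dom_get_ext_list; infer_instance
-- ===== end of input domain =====

-- B replaces A's indexed forward loop with its last-index branch by a reverse
-- traversal carrying the previous element, building the output back-to-front; same O(n) cost.

-- ===== PORT A =====
def get_ext_list (init_ext_list : List Int) : List Int :=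
  (PySem.List.pyRange 0 init_ext_list.length 1).foldl
    (fun ext_list n =>
      if n = (init_ext_list.length : Int) - 1 then
        ext_list ++ [PySem.List.pyGetD init_ext_list n 0]
      else
        ext_list ++ [PySem.List.pyGetD init_ext_list n 0 - PySem.List.pyGetD init_ext_list (n + 1) 0])
    []

-- ===== PORT B =====
def get_ext_list_alt (init_ext_list : List Int) : List Int :=
  (init_ext_list.reverse.foldl
    (fun (s : List Int × Option Int) x =>
      (s.1 ++ [match s.2 with | none => x | some prev => x - prev], some x))
    ([], none)).1.reverse

-- ===== PRECONDITION & SPEC =====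
def Spec_get_ext_list (init_ext_list : List Int) (out : List Int) : Prop := out = get_ext_list_alt init_ext_list
instance (init_ext_list : List Int) (out : List Int) : Decidable (Spec_get_ext_list init_ext_list out) := by unfold Spec_get_ext_list; infer_instance

-- ===== CLAIM (what is proved, stated in full; the proofs are below) =====
def Claim_equal_get_ext_list : Prop := ∀ (init_ext_list : List Int), Dom_get_ext_list init_ext_list → Spec_get_ext_list init_ext_list (get_ext_list init_ext_list)

-- ===== LEMMAS AND PROOFS =====

theorem get_ext_list_eq_map (l : List Int) :
    get_ext_list l = (List.range l.length).map (fun k : Nat =>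
      if (k : Int) = (l.length : Int) - 1 then PySem.List.pyGetD l (k : Int) 0
      else PySem.List.pyGetD l (k : Int) 0 - PySem.List.pyGetD l ((k : Int) + 1) 0) := by
  unfold get_ext_list
  rw [show (fun (ext_list : List Int) (n : Int) =>
        if n = (l.length : Int) - 1 then ext_list ++ [PySem.List.pyGetD l n 0]
        else ext_list ++ [PySem.List.pyGetD l n 0 - PySem.List.pyGetD l (n + 1) 0])
      = (fun (ext_list : List Int) (n : Int) => ext_list ++
          [if n = (l.length : Int) - 1 then PySem.List.pyGetD l n 0
           else PySem.List.pyGetD l n 0 - PySem.List.pyGetD l (n + 1) 0]) from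
      funext fun _ => funext fun _ => by split_ifs <;> rfl]
  rw [PySem.List.pyRange_zero_natCast, List.foldl_map,
    PySem.List.foldl_append_singleton_eq_map, List.nil_append]

theorem a_cons_cons (x y : Int) (t : List Int) :
    get_ext_list (x :: y :: t) = (x - y) :: get_ext_list (y :: t) := by
  rw [get_ext_list_eq_map, get_ext_list_eq_map]
  simp only [List.length_cons]
  rw [List.range_succ_eq_map]
  simp only [List.map_cons, List.map_map]
  congr 1
  · push_cast
    rw [if_neg (by omega)]
    norm_num [PySem.List.pyGetD, PySem.List.pyGet?, PySem.List.pyIdx?]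
    rw [if_pos (by omega : (0 : Int) ≤ (t.length : Int) + 1)]
    simp
  · apply List.map_congr_left
    intro k hk
    simp only [Function.comp]
    have e1 : PySem.List.pyGetD (x :: y :: t) ((k + 1 : Nat) : Int) 0
        = PySem.List.pyGetD (y :: t) (k : Int) 0 := by
      rw [PySem.List.pyGetD_natCast, PySem.List.pyGetD_natCast]; rfl
    have e2 : PySem.List.pyGetD (x :: y :: t) (((k + 1 : Nat) : Int) + 1) 0
        = PySem.List.pyGetD (y :: t) ((k : Int) + 1) 0 := by
      have : (((k + 1 : Nat) : Int) + 1) = ((k + 2 : Nat) : Int) := by push_cast; ring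
      rw [this, show ((k : Int) + 1) = ((k + 1 : Nat) : Int) by push_cast; ring,
        PySem.List.pyGetD_natCast, PySem.List.pyGetD_natCast]
      rfl
    push_cast
    by_cases hc : (k : Int) = (t.length : Int)
    · simp only [if_pos (by omega : (k : Int) + 1 = (t.length : Int) + 1 + 1 - 1),
        if_pos (by omega : (k : Int) = (t.length : Int) + 1 - 1)]
      have := e1; push_cast at this; exact this
    · simp only [if_neg (by omega : ¬ ((k : Int) + 1 = (t.length : Int) + 1 + 1 - 1)),
        if_neg (by omega : ¬ ((k : Int) = (t.length : Int) + 1 - 1))]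
      have h1 := e1; have h2 := e2; push_cast at h1 h2; rw [h1, h2]

theorem snd_foldl_step (m : List Int) (h : m ≠ []) (s : List Int × Option Int) :
    (m.foldl (fun (s : List Int × Option Int) x =>
      (s.1 ++ [match s.2 with | none => x | some prev => x - prev], some x)) s).2
      = m.getLast? := by
  induction m generalizing s with
  | nil => exact absurd rfl h
  | cons a m' ih =>
    cases m' with
    | nil => simp [List.foldl]
    | cons b m'' =>
      rw [List.foldl_cons, List.getLast?_cons_cons]
      exact ih (by simp) _

theorem alt_cons_cons (x y : Int) (t : List Int) :
    get_ext_list_alt (x :: y :: t) = (x - y) :: get_ext_list_alt (y :: t) := by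
  unfold get_ext_list_alt
  rw [List.reverse_cons, List.foldl_append]
  rcases hS : ((y :: t).reverse.foldl (fun (s : List Int × Option Int) x =>
      (s.1 ++ [match s.2 with | none => x | some prev => x - prev], some x)) ([], none))
    with ⟨o, p⟩
  have h2 : p = some y := by
    have := snd_foldl_step (y :: t).reverse (by simp) ([], none)
    rw [hS] at this
    simp only [] at this
    rw [this, List.getLast?_reverse]
    rfl
  subst h2
  simp [List.foldl]

theorem a_eq_b (l : List Int) : get_ext_list l = get_ext_list_alt l := by
  induction l with
  | nil => decide
  | cons x t ih =>
    cases t with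
    | nil =>
      rw [get_ext_list_eq_map]
      simp [get_ext_list_alt, List.range_succ, List.foldl, PySem.List.pyGetD,
        PySem.List.pyGet?, PySem.List.pyIdx?]
    | cons y t' => rw [a_cons_cons, alt_cons_cons, ih]

-- ===== VERDICT (by name: the statement is the Claim_ definition above) =====
theorem get_ext_list_spec : Claim_equal_get_ext_list := by
  intro l _
  unfold Spec_get_ext_list
  exact a_eq_b l
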